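-- pv_equiv track=rewrite | github.com/Anapher/efficentalgorithms | 3_filefragmentation/main.py | check_single_bucket
-- ===== SOURCE A (Python) =====
-- def check_single_bucket(bucket, solution):
--     remaining = list(bucket)
--
--     while remaining:
--         current = remaining.pop()
--
--         counter = [
--             i
--             for i in range(len(remaining))
--             if current + remaining[i] == solution or remaining[i] + current == solution
--         ]
--
--         if len(counter) == 0:
--             return False
--
--         del remaining[counter[0]]
--
--     return True
-- ===== SOURCE B (Python) =====
-- def check_single_bucket(bucket, solution):
--     arr = sorted(bucket)
--     if len(arr) % 2 == 1:
--         return False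
--     i, j = 0, len(arr) - 1
--     while i < j:
--         if arr[i] + arr[j] != solution:
--             return False
--         i += 1
--         j -= 1
--     return True
-- ===== Notes on version B (the rewrite author's own statement) =====
-- stated objective: faster
-- what changed: Replaces A's repeated linear scans over a shrinking list (pop last, search for a complement, delete it) with one sort followed by a single inward two-pointer sweep over the sorted copy.
import Mathlib
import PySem

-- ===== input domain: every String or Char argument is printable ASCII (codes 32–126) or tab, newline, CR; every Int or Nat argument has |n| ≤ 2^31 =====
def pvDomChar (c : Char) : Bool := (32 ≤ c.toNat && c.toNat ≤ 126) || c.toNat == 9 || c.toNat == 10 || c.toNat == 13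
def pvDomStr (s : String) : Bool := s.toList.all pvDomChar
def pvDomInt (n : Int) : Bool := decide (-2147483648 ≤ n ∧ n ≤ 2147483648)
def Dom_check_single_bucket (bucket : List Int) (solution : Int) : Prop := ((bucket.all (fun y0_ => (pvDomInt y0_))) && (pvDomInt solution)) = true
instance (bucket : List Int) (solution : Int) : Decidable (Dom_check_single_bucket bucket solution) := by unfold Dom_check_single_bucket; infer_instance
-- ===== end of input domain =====

-- B replaces A's pop-and-scan pairing loop with sort + one inward two-pointer sweep (objective: faster).

-- ===== PORT A =====
-- A's while-loop: pop the last element, scan the rest for the first complement, delete it, repeat.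
def pvALoop (S : Int) : List Int → Bool
  | [] => true
  | x :: xs =>
    -- current = remaining.pop()
    let current := (x :: xs).getLast (by simp)
    let rest := (x :: xs).dropLast
    -- counter = [i for i in range(len(remaining)) if current + remaining[i] == solution or remaining[i] + current == solution]
    let counter := (List.range rest.length).filter
      (fun i => decide (current + rest.getD i 0 = S) || decide (rest.getD i 0 + current = S))
    match counter with
    | [] => false
    | i :: _ => pvALoop S (rest.eraseIdx i)
  termination_by l => l.length
  decreasing_by
    simp only [List.length_cons]
    calc ((x :: xs).dropLast.eraseIdx i).length ≤ (x :: xs).dropLast.length := List.length_eraseIdx_le ..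
      _ = xs.length := by simp
      _ < xs.length + 1 := Nat.lt_succ_self _

def check_single_bucket (bucket : List Int) (solution : Int) : Bool :=
  pvALoop solution bucket

-- ===== PORT B =====
-- the `while i < j` inward sweep over the sorted array, as recursion chopping head and last
def pvSweep (S : Int) : List Int → Bool
  | [] => true
  | [_] => true       -- i = j: the while-loop body never runs
  | a :: b :: t =>
    (decide (a + (b :: t).getLast (by simp) = S)) && pvSweep S ((b :: t).dropLast)
  termination_by l => l.length
  decreasing_by simp

def check_single_bucket_alt (bucket : List Int) (solution : Int) : Bool :=
  let arr := PySem.List.sorted bucket (fun x => x) false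
  if arr.length % 2 == 1 then false
  else pvSweep solution arr

-- ===== PRECONDITION & SPEC =====
def Spec_check_single_bucket (bucket : List Int) (solution : Int) (out : Bool) : Prop := out = check_single_bucket_alt bucket solution
instance (bucket : List Int) (solution : Int) (out : Bool) : Decidable (Spec_check_single_bucket bucket solution out) := by unfold Spec_check_single_bucket; infer_instance

-- ===== CLAIM (what is proved, stated in full; the proofs are below) =====
def Claim_equal_check_single_bucket : Prop := ∀ (bucket : List Int) (solution : Int), Dom_check_single_bucket bucket solution → Spec_check_single_bucket bucket solution (check_single_bucket bucket solution)

-- ===== LEMMAS AND PROOFS =====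

-- the common specification: the multiset splits into pairs each summing to S
inductive PairsTo (S : Int) : Multiset Int → Prop
  | nil : PairsTo S 0
  | cons (a b : Int) (m : Multiset Int) : a + b = S → PairsTo S m → PairsTo S (a ::ₘ b ::ₘ m)

theorem pairsTo_card_even {S : Int} {m : Multiset Int} (h : PairsTo S m) : Even (Multiset.card m) := by
  induction h with
  | nil => simp
  | cons a b m hab hm ih =>
    rw [Nat.even_iff] at ih ⊢
    simp only [Multiset.card_cons]
    omega

theorem erase_cons_of_mem {x v : Int} {t : Multiset Int} (hv : v ∈ t) :
    (x ::ₘ t).erase v = x ::ₘ t.erase v := by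
  by_cases hx : x = v
  · subst hx; rw [Multiset.erase_cons_head, Multiset.cons_erase hv]
  · exact Multiset.erase_cons_tail t hx

-- exchange lemma: a pairable multiset pairs any of its elements with its complement
theorem pairsTo_exchange {S : Int} {m : Multiset Int} (h : PairsTo S m) :
    ∀ a ∈ m, (S - a) ∈ m.erase a ∧ PairsTo S ((m.erase a).erase (S - a)) := by
  induction h with
  | nil => intro a ha; simp at ha
  | cons x y m' hxy hm ih =>
    intro a ha
    by_cases hax : a = x
    · subst hax
      have hy : y = S - a := by omega
      subst hy
      refine ⟨by simp, ?_⟩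
      simpa using hm
    · by_cases hay : a = y
      · subst hay
        have hx : x = S - a := by omega
        rw [erase_cons_of_mem (by simp), hx, Multiset.erase_cons_head]
        refine ⟨by simp, ?_⟩
        rw [Multiset.erase_cons_head]
        exact hm
      · have ham : a ∈ m' := by
          rcases Multiset.mem_cons.mp ha with h1 | h1
          · exact absurd h1 hax
          · rcases Multiset.mem_cons.mp h1 with h2 | h2
            · exact absurd h2 hay
            · exact h2
        obtain ⟨hc, hp⟩ := ih a ham
        have he : (x ::ₘ y ::ₘ m').erase a = x ::ₘ y ::ₘ m'.erase a := by
          rw [erase_cons_of_mem (Multiset.mem_cons_of_mem ham), erase_cons_of_mem ham]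
        rw [he]
        refine ⟨Multiset.mem_cons_of_mem (Multiset.mem_cons_of_mem hc), ?_⟩
        rw [erase_cons_of_mem (Multiset.mem_cons_of_mem hc), erase_cons_of_mem hc]
        exact PairsTo.cons x y _ hxy hp

-- helper: nonempty lists split as dropLast ++ [getLast]
theorem list_eq_dropLast_getLast {l : List Int} (h : l ≠ []) :
    l = l.dropLast ++ [l.getLast h] := (List.dropLast_append_getLast h).symm

-- ===== A ↔ PairsTo =====
theorem pvALoop_iff (S : Int) : ∀ (n : Nat) (l : List Int), l.length ≤ n →
    (pvALoop S l = true ↔ PairsTo S (↑l)) := by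
  intro n
  induction n with
  | zero =>
    intro l hl
    have : l = [] := List.eq_nil_of_length_eq_zero (by omega)
    subst this
    simpa [pvALoop] using PairsTo.nil
  | succ n IH =>
    intro l hl
    match l with
    | [] => simpa [pvALoop] using PairsTo.nil
    | x :: xs =>
      rw [pvALoop]
      set current := (x :: xs).getLast (by simp) with hcur
      set rest := (x :: xs).dropLast with hrest
      have hrestlen : rest.length = xs.length := by rw [hrest]; simp
      have hsplit : (x :: xs) = rest ++ [current] := list_eq_dropLast_getLast (by simp)
      have hms : (↑(x :: xs) : Multiset Int) = current ::ₘ ↑rest := by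
        conv_lhs => rw [hsplit]
        simp
      constructor
      · -- A returns true → PairsTo
        intro htrue
        revert htrue
        rcases hfc : (List.range rest.length).filter
            (fun i => decide (current + rest.getD i 0 = S) || decide (rest.getD i 0 + current = S))
          with _ | ⟨i, is⟩
        · intro htrue
          exact Bool.noConfusion htrue
        · intro htrue
          have hi : i ∈ (List.range rest.length).filter
              (fun i => decide (current + rest.getD i 0 = S) || decide (rest.getD i 0 + current = S)) := by
            rw [hfc]; exact List.mem_cons_self
          rw [List.mem_filter, List.mem_range] at hi
          obtain ⟨hilen, hcond⟩ := hi
          have hgd : rest.getD i 0 = rest[i] := by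
            simp [List.getD_eq_getElem?_getD, List.getElem?_eq_getElem hilen]
          have hsum : current + rest[i] = S := by
            rcases Bool.or_eq_true_iff.mp hcond with h1 | h1 <;>
              (have := of_decide_eq_true h1; rw [hgd] at this; omega)
          have hperm : (rest[i] :: rest.eraseIdx i).Perm rest :=
            List.getElem_cons_eraseIdx_perm hilen
          have hrec : PairsTo S (↑(rest.eraseIdx i)) := by
            refine (IH _ ?_).mp htrue
            calc (rest.eraseIdx i).length ≤ rest.length := List.length_eraseIdx_le ..
              _ = xs.length := hrestlen
              _ ≤ n := by simpa using hl
          have hbig : PairsTo S (current ::ₘ rest[i] ::ₘ ↑(rest.eraseIdx i)) :=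
            PairsTo.cons _ _ _ hsum hrec
          rw [hms, ← Multiset.coe_eq_coe.mpr hperm]
          simpa using hbig
      · -- PairsTo → A returns true
        intro hp
        have hcurmem : current ∈ (↑(x :: xs) : Multiset Int) := by rw [hms]; simp
        obtain ⟨hcm, hpm⟩ := pairsTo_exchange hp current hcurmem
        rw [hms, Multiset.erase_cons_head] at hcm hpm
        -- the complement is in rest, so the filter is nonempty
        have hex : ∃ j, j ∈ (List.range rest.length).filter
            (fun i => decide (current + rest.getD i 0 = S) || decide (rest.getD i 0 + current = S)) := by
          obtain ⟨j, hjlen, hval⟩ := List.mem_iff_getElem.mp (Multiset.mem_coe.mp hcm)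
          refine ⟨j, ?_⟩
          rw [List.mem_filter, List.mem_range]
          refine ⟨hjlen, ?_⟩
          have hgd : rest.getD j 0 = rest[j] := by
            simp [List.getD_eq_getElem?_getD, List.getElem?_eq_getElem hjlen]
          simp only [Bool.or_eq_true_iff, decide_eq_true_eq]
          left
          rw [hgd, hval]
          omega
        rcases hfc : (List.range rest.length).filter
            (fun i => decide (current + rest.getD i 0 = S) || decide (rest.getD i 0 + current = S))
          with _ | ⟨i, is⟩
        · obtain ⟨j, hj⟩ := hex
          rw [hfc] at hj
          simp at hj
        · show pvALoop S (rest.eraseIdx i) = true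
          have hi : i ∈ (List.range rest.length).filter
              (fun i => decide (current + rest.getD i 0 = S) || decide (rest.getD i 0 + current = S)) := by
            rw [hfc]; exact List.mem_cons_self
          rw [List.mem_filter, List.mem_range] at hi
          obtain ⟨hilen, hcond⟩ := hi
          have hgd : rest.getD i 0 = rest[i] := by
            simp [List.getD_eq_getElem?_getD, List.getElem?_eq_getElem hilen]
          have hval : rest[i] = S - current := by
            rcases Bool.or_eq_true_iff.mp hcond with h1 | h1 <;>
              (have := of_decide_eq_true h1; rw [hgd] at this; omega)
          have hperm : (rest[i] :: rest.eraseIdx i).Perm rest :=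
            List.getElem_cons_eraseIdx_perm hilen
          have hmrest : (↑rest : Multiset Int) = (S - current) ::ₘ ↑(rest.eraseIdx i) := by
            rw [← Multiset.coe_eq_coe.mpr hperm, hval]; rfl
          have hpe : PairsTo S (↑(rest.eraseIdx i)) := by
            rw [hmrest, Multiset.erase_cons_head] at hpm
            exact hpm
          refine (IH _ ?_).mpr hpe
          calc (rest.eraseIdx i).length ≤ rest.length := List.length_eraseIdx_le ..
            _ = xs.length := hrestlen
            _ ≤ n := by simpa using hl

-- ===== B ↔ PairsTo =====
theorem pvSweep_iff (S : Int) : ∀ (n : Nat) (l : List Int), l.length ≤ n →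
    l.Pairwise (· ≤ ·) → Even l.length →
    (pvSweep S l = true ↔ PairsTo S (↑l)) := by
  intro n
  induction n with
  | zero =>
    intro l hl _ _
    have : l = [] := List.eq_nil_of_length_eq_zero (by omega)
    subst this
    simpa [pvSweep] using PairsTo.nil
  | succ n IH =>
    intro l hl hsorted hev
    match l with
    | [] => simpa [pvSweep] using PairsTo.nil
    | [a] => simp at hev
    | a :: b :: t =>
      rw [pvSweep]
      set last := (b :: t).getLast (by simp) with hlast
      set mid := (b :: t).dropLast with hmid
      have hsplit : (b :: t) = mid ++ [last] := list_eq_dropLast_getLast (by simp)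
      have hmbt : (↑(b :: t) : Multiset Int) = last ::ₘ ↑mid := by
        conv_lhs => rw [hsplit]
        simp
      have hms : (↑(a :: b :: t) : Multiset Int) = a ::ₘ last ::ₘ ↑mid := by
        have : (↑(a :: b :: t) : Multiset Int) = a ::ₘ ↑(b :: t) := rfl
        rw [this, hmbt]
      have hmidlen : mid.length = t.length := by rw [hmid]; simp
      have hmidev : Even mid.length := by
        rw [Nat.even_iff] at hev ⊢
        simp only [List.length_cons] at hev
        omega
      have hmidsorted : mid.Pairwise (· ≤ ·) := by
        have hsub : mid.Sublist (a :: b :: t) := by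
          rw [hmid]
          exact (List.dropLast_sublist _).trans (List.sublist_cons_self _ _)
        exact hsorted.sublist hsub
      have hmidlt : mid.length ≤ n := by
        simp only [List.length_cons] at hl
        omega
      -- bounds from sortedness
      have hle_a : ∀ y ∈ (b :: t), a ≤ y := fun y hy => List.rel_of_pairwise_cons hsorted hy
      have hle_last : ∀ y ∈ (a :: b :: t), y ≤ last := by
        have hpw := List.pairwise_append.mp (hsplit ▸ hsorted.of_cons)
        intro y hy
        rcases hy with _ | hy
        · -- y = a
          have hb : (b : Int) ∈ (b :: t) := by simp
          rcases List.mem_append.mp (hsplit ▸ hb) with hbm | hbm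
          · exact le_trans (List.rel_of_pairwise_cons hsorted (by simp))
              (hpw.2.2 b hbm last (by simp))
          · simp at hbm
            exact hbm ▸ List.rel_of_pairwise_cons hsorted (by simp)
        · next hy =>
          rcases List.mem_append.mp (hsplit ▸ hy) with hym | hym
          · exact hpw.2.2 y hym last (by simp)
          · simp at hym; omega
      constructor
      · intro htrue
        obtain ⟨hsum, hrec⟩ := Bool.and_eq_true_iff.mp htrue
        have hsum : a + last = S := of_decide_eq_true hsum
        have hmidp := (IH mid hmidlt hmidsorted hmidev).mp hrec
        rw [hms]
        exact PairsTo.cons _ _ _ hsum hmidp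
      · intro hp
        have hamem : a ∈ (↑(a :: b :: t) : Multiset Int) := by simp
        obtain ⟨hca, hpa⟩ := pairsTo_exchange hp a hamem
        have hea : (↑(a :: b :: t) : Multiset Int).erase a = ↑(b :: t) := by
          rw [show (↑(a :: b :: t) : Multiset Int) = a ::ₘ ↑(b :: t) from rfl]
          exact Multiset.erase_cons_head ..
        rw [hea] at hca hpa
        have h1 : S - a ≤ last := hle_last _ (List.mem_cons_of_mem a (Multiset.mem_coe.mp hca))
        have hlmem : last ∈ (↑(a :: b :: t) : Multiset Int) := by rw [hms]; simp
        obtain ⟨hcl, _⟩ := pairsTo_exchange hp last hlmem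
        have h2 : a ≤ S - last := by
          have hmem : (S - last) ∈ (a :: b :: t) :=
            Multiset.mem_coe.mp (Multiset.mem_of_mem_erase hcl)
          rcases hmem with _ | hmem
          · omega
          · next hmem => exact hle_a _ hmem
        have hsum : a + last = S := by omega
        have hpmid : PairsTo S (↑mid) := by
          rw [show S - a = last from by omega, hmbt, Multiset.erase_cons_head] at hpa
          exact hpa
        rw [Bool.and_eq_true_iff]
        exact ⟨decide_eq_true hsum, (IH mid hmidlt hmidsorted hmidev).mpr hpmid⟩

-- ===== VERDICT (by name: the statement is the Claim_ definition above) =====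
theorem check_single_bucket_spec : Claim_equal_check_single_bucket := by
  intro bucket solution _
  unfold Spec_check_single_bucket check_single_bucket check_single_bucket_alt
  set arr := PySem.List.sorted bucket (fun x => x) false with harr
  have hperm : arr.Perm bucket := PySem.List.sorted_perm ..
  have hmeq : (↑arr : Multiset Int) = ↑bucket := Multiset.coe_eq_coe.mpr hperm
  have hsorted : arr.Pairwise (· ≤ ·) := by
    simpa using PySem.List.sorted_pairwise bucket (fun x => x)
  by_cases hodd : arr.length % 2 = 1
  · -- odd length: both sides are false
    have hlen : bucket.length % 2 = 1 := by rw [← hperm.length_eq]; exact hodd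
    have hA : pvALoop solution bucket = false := by
      rcases Bool.eq_false_or_eq_true (pvALoop solution bucket) with h | h
      swap
      · exact h
      · exfalso
        have hpt := (pvALoop_iff solution bucket.length bucket le_rfl).mp h
        have := pairsTo_card_even hpt
        rw [Nat.even_iff] at this
        simp only [Multiset.coe_card] at this
        omega
    simp [hA, hodd]
  · have heven : Even arr.length := Nat.even_iff.mpr (by omega)
    have hiff := pvSweep_iff solution arr.length arr le_rfl hsorted heven
    have hAiff := pvALoop_iff solution bucket.length bucket le_rfl
    rw [hmeq] at hiff
    have hmain : pvALoop solution bucket = pvSweep solution arr := by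
      rcases Bool.eq_false_or_eq_true (pvALoop solution bucket) with h | h <;>
        rcases Bool.eq_false_or_eq_true (pvSweep solution arr) with h2 | h2 <;>
        rw [h, h2] <;> first
          | rfl
          | (exfalso; rw [h2] at hiff; exact absurd (hiff.mpr (hAiff.mp h)) (by simp))
          | (exfalso; rw [h] at hAiff; exact absurd (hAiff.mpr (hiff.mp h2)) (by simp))
    simp only [hmain]
    simp [Nat.mod_two_ne_one.mp hodd]
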